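-- pv_equiv track=rewrite | github.com/ksusuhyun/algorithm | 백준/Silver/1697. 숨바꼭질/숨바꼭질.py | bfs
-- ===== SOURCE A (Python) =====
-- from collections import deque
--
-- def bfs(s, e):
--     q = deque()
--     v = [0]*200000
--
--     q.append(s)
--     v[s] = 1
--
--     while q:
--         c = q.popleft()
--         if c == e:
--             return v[c]
--
--         for d in (-1, 1, 2):
--             if abs(d) == 1:
--                 n = c + d
--             else:
--                 n = c * d
--             if 0<=n<200000 and v[n]==0:
--                 v[n] = v[c] + 1
--                 q.append(n)
-- ===== SOURCE B (Python) =====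
-- def bfs(s, e):
--     v = [0] * 200000
--     v[s] = 1
--     frontier = [s]
--     depth = 1
--     while frontier:
--         if e in frontier:
--             return depth
--         nxt = []
--         for c in frontier:
--             for n in (c - 1, c + 1, c * 2):
--                 if 0 <= n < 200000 and v[n] == 0:
--                     v[n] = 1
--                     nxt.append(n)
--         frontier = nxt
--         depth += 1
--     return None
-- ===== Notes on version B (the rewrite author's own statement) =====
-- stated objective: alternative
-- what changed: Replaces the deque-plus-distance-array BFS (pop one node, return its stored distance when it equals e) by a level-synchronous BFS: a frontier list expanded level by level with a plain 0/1 visited array and a depth counter, returning the depth when e appears in the frontier.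
-- outside the precondition, e.g. on bfs(5, -3): A returns None, B returns None; on bfs(-1, 199999): A returns None, B returns None; on bfs(200000, 5): A raises IndexError, B raises IndexError
import Mathlib
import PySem

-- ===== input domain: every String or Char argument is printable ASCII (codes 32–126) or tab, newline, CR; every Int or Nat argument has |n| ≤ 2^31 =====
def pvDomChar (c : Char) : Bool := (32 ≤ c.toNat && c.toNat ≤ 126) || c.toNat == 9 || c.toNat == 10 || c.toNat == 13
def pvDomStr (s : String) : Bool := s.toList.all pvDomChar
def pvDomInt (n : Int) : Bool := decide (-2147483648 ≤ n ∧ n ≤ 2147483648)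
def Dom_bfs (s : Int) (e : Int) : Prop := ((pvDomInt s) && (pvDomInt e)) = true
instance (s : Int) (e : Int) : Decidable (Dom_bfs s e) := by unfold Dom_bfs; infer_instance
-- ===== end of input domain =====

-- B replaces A's deque-with-distance-array BFS by a level-synchronous BFS (frontier list,
-- 0/1 visited flags, depth counter); same return value on Pre_bfs, no speed claim.
-- Shared modelling helpers: the Python list `v = [0]*200000` is an `Array Nat` (its values
-- are BFS depths, naturals; only increments occur); `vidx` is Python's negative-index rule
-- for a list of length 200000, `vget`/`vset` are `v[c]` / `v[c] = x` (exact wherever the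
-- index is in range; out-of-range writes — where Python raises IndexError — are excluded
-- by Pre_bfs).

def vidx (c : Int) : Nat := (if c < 0 then c + 200000 else c).toNat

def vget (v : Array Nat) (c : Int) : Nat := v.getD (vidx c) 0

def vset (v : Array Nat) (c : Int) (x : Nat) : Array Nat := v.setIfInBounds (vidx c) x

-- (termination helpers for the BFS loops, cited by their `decreasing_by`)
theorem pv_count_set (l : List Nat) (i : Nat) (h : i < l.length) (w : Nat)
    (h0 : l[i] = 0) (hw : w ≠ 0) : (l.set i w).count 0 + 1 = l.count 0 := by
  rw [List.set_eq_take_append_cons_drop, if_pos h]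
  conv_rhs => rw [← List.take_append_drop i l, List.drop_eq_getElem_cons h]
  rw [List.count_append, List.count_append, List.count_cons, List.count_cons]
  simp [h0, hw]
  omega

theorem pv_count_vset (v : Array Nat) (n : Int) (w : Nat) (h1 : vidx n < v.size)
    (h4 : vget v n = 0) (hw : w ≠ 0) :
    (vset v n w).toList.count 0 + 1 = v.toList.count 0 := by
  have hl : vidx n < v.toList.length := by simpa using h1
  have h0 : v.toList[vidx n] = 0 := by
    have hh : vget v n = v.toList[vidx n] := by
      simp [vget, Array.getD, h1]
    omega
  rw [vset, Array.toList_setIfInBounds]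
  exact pv_count_set v.toList (vidx n) hl w h0 hw

-- ===== PORT A =====
-- A's deque is ported as an array plus a head index (append = push, popleft = read the
-- head element and advance the head): the element sequence is exactly the deque's.

def pushA (c : Int) (st : Array Int × Array Nat) (d : Int) : Array Int × Array Nat :=
  let n := if d.natAbs = 1 then c + d else c * d
  if vidx n < st.2.size ∧ 0 ≤ n ∧ n < 200000 ∧ vget st.2 n = 0 then
    (st.1.push n, vset st.2 n (vget st.2 c + 1))
  else st

theorem pv_phiA_push (c : Int) (st : Array Int × Array Nat) (d : Int) :
    4 * ((pushA c st d).2.toList.count 0) + (pushA c st d).1.size + 3 ≤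
      4 * (st.2.toList.count 0) + st.1.size ∨ pushA c st d = st := by
  unfold pushA
  dsimp only
  set n := if d.natAbs = 1 then c + d else c * d with hn
  split_ifs with h
  · left
    have hc := pv_count_vset st.2 n (vget st.2 c + 1) h.1 h.2.2.2 (by omega)
    simp only [Array.size_push]
    omega
  · right; rfl

theorem pv_phiA_fold (c : Int) (ds : List Int) : ∀ (st : Array Int × Array Nat),
    4 * ((List.foldl (pushA c) st ds).2.toList.count 0) + (List.foldl (pushA c) st ds).1.size ≤
      4 * (st.2.toList.count 0) + st.1.size := by
  induction ds with
  | nil => intro st; simp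
  | cons d ds ih =>
    intro st
    have h1 := pv_phiA_push c st d
    have h2 := ih (pushA c st d)
    simp only [List.foldl_cons]
    rcases h1 with h1 | h1
    · omega
    · rw [h1] at h2 ⊢; omega

theorem pv_sizeA_fold (c : Int) (ds : List Int) : ∀ (st : Array Int × Array Nat),
    st.1.size ≤ (List.foldl (pushA c) st ds).1.size := by
  induction ds with
  | nil => intro st; simp
  | cons d ds ih =>
    intro st
    have h2 := ih (pushA c st d)
    have h1 : st.1.size ≤ (pushA c st d).1.size := by
      unfold pushA; dsimp only; split_ifs <;> simp
    simp only [List.foldl_cons]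
    omega

def bfsLoopA (e : Int) (q : Array Int) (head : Nat) (v : Array Nat) : Int :=
  if h : head < q.size then
    let c := q[head]
    if c = e then (vget v c : Int)
    else
      let st := List.foldl (pushA c) (q, v) [-1, 1, 2]
      bfsLoopA e st.1 (head + 1) st.2
  else 0
termination_by 4 * v.toList.count 0 + (q.size - head)
decreasing_by
  have h1 := pv_phiA_fold q[head] [-1, 1, 2] (q, v)
  have h2 := pv_sizeA_fold q[head] [-1, 1, 2] (q, v)
  dsimp only at h1 h2
  omega

def bfs (s : Int) (e : Int) : Int :=
  let v := vset (Array.replicate 200000 0) s 1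
  bfsLoopA e #[s] 0 v

-- ===== PORT B =====
-- B's frontier / nxt lists are ported as arrays (append = push); `e in frontier` is
-- `Array.contains`; `stepB` is the inner `for n in (c - 1, c + 1, c * 2)` loop.

def pushB (st : Array Nat × Array Int) (n : Int) : Array Nat × Array Int :=
  if vidx n < st.1.size ∧ 0 ≤ n ∧ n < 200000 ∧ vget st.1 n = 0 then
    (vset st.1 n 1, st.2.push n)
  else st

def stepB (st : Array Nat × Array Int) (c : Int) : Array Nat × Array Int :=
  List.foldl pushB st [c - 1, c + 1, c * 2]

theorem pv_phiB_push (st : Array Nat × Array Int) (n : Int) :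
    4 * ((pushB st n).1.toList.count 0) + (pushB st n).2.size + 3 ≤
      4 * (st.1.toList.count 0) + st.2.size ∨ pushB st n = st := by
  unfold pushB
  split_ifs with h
  · left
    have hc := pv_count_vset st.1 n 1 h.1 h.2.2.2 (by omega)
    simp only [Array.size_push]
    omega
  · right; rfl

theorem pv_phiB_inner (ns : List Int) : ∀ (st : Array Nat × Array Int),
    4 * ((List.foldl pushB st ns).1.toList.count 0) + (List.foldl pushB st ns).2.size ≤
      4 * (st.1.toList.count 0) + st.2.size := by
  induction ns with
  | nil => intro st; simp
  | cons n ns ih =>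
    intro st
    have h1 := pv_phiB_push st n
    have h2 := ih (pushB st n)
    simp only [List.foldl_cons]
    rcases h1 with h1 | h1
    · omega
    · rw [h1] at h2 ⊢; omega

theorem pv_phiB_outer (cs : List Int) : ∀ (st : Array Nat × Array Int),
    4 * ((List.foldl stepB st cs).1.toList.count 0) + (List.foldl stepB st cs).2.size ≤
      4 * (st.1.toList.count 0) + st.2.size := by
  induction cs with
  | nil => intro st; simp
  | cons c cs ih =>
    intro st
    have h1 : 4 * ((stepB st c).1.toList.count 0) + (stepB st c).2.size ≤
        4 * (st.1.toList.count 0) + st.2.size := pv_phiB_inner [c - 1, c + 1, c * 2] st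
    have h2 := ih (stepB st c)
    rw [List.foldl_cons]
    omega

def bfsLoopB (e : Int) (frontier : Array Int) (v : Array Nat) (depth : Int) : Int :=
  if frontier.size = 0 then 0
  else if frontier.contains e then depth
  else
    let st := frontier.foldl stepB (v, #[])
    bfsLoopB e st.2 st.1 (depth + 1)
termination_by 4 * v.toList.count 0 + frontier.size
decreasing_by
  simp only [Array.size_attach, Array.foldl_subtype', Array.unattach_attach]
  rw [← Array.foldl_toList]
  have h1 : 4 * ((List.foldl stepB (v, #[]) frontier.toList).1.toList.count 0) +
      (List.foldl stepB (v, #[]) frontier.toList).2.size ≤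
      4 * (v.toList.count 0) + (#[] : Array Int).size := pv_phiB_outer frontier.toList (v, #[])
  simp only [Array.size_empty] at h1
  omega

def bfs_alt (s : Int) (e : Int) : Int :=
  let v := vset (Array.replicate 200000 0) s 1
  bfsLoopB e #[s] v 1

-- ===== PRECONDITION & SPEC =====
-- Pre_bfs is exactly the set of inputs on which the Python A returns an int: outside it A
-- either raises IndexError (s < -200000 or s ≥ 200000, at `v[s] = 1`) or falls off the
-- loop returning None (e unreachable: e ∉ [0,200000) with e ≠ s; s ≤ -2 with e ≠ s, where
-- nothing is ever enqueued; or s = -1 with e = 199999, whose cell is pre-marked by the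
-- wrapped write v[-1] = 1 so e is never enqueued). B returns None / raises there too.
def Pre_bfs (s : Int) (e : Int) : Prop :=
  (-200000 ≤ s ∧ s < 200000) ∧
    (e = s ∨ (0 ≤ s ∧ 0 ≤ e ∧ e < 200000) ∨ (s = -1 ∧ 0 ≤ e ∧ e < 199999))

instance (s : Int) (e : Int) : Decidable (Pre_bfs s e) := by unfold Pre_bfs; infer_instance

def pvWitness_bfs : Int × Int := (3, 7)

def Spec_bfs (s : Int) (e : Int) (out : Int) : Prop := out = bfs_alt s e
instance (s : Int) (e : Int) (out : Int) : Decidable (Spec_bfs s e out) := by unfold Spec_bfs; infer_instance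

-- ===== CLAIM (what is proved, stated in full; the proofs are below) =====
def Claim_equal_bfs : Prop := ∀ (s : Int) (e : Int), Dom_bfs s e → Pre_bfs s e → Spec_bfs s e (bfs s e)

-- ===== LEMMAS AND PROOFS =====

-- List-level models of the two loops (proof layer only): `loopL` is A's loop on the plain
-- queue list, `loopM` is B's loop on the plain frontier list.

def pushL (c : Int) (st : List Int × Array Nat) (d : Int) : List Int × Array Nat :=
  let n := if d.natAbs = 1 then c + d else c * d
  if vidx n < st.2.size ∧ 0 ≤ n ∧ n < 200000 ∧ vget st.2 n = 0 then
    (st.1 ++ [n], vset st.2 n (vget st.2 c + 1))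
  else st

def stepL (st : List Int × Array Nat) (c : Int) : List Int × Array Nat :=
  List.foldl (pushL c) st [-1, 1, 2]

theorem pv_phiL_push (c : Int) (st : List Int × Array Nat) (d : Int) :
    4 * ((pushL c st d).2.toList.count 0) + (pushL c st d).1.length + 3 ≤
      4 * (st.2.toList.count 0) + st.1.length ∨ pushL c st d = st := by
  unfold pushL
  dsimp only
  set n := if d.natAbs = 1 then c + d else c * d with hn
  split_ifs with h
  · left
    have hc := pv_count_vset st.2 n (vget st.2 c + 1) h.1 h.2.2.2 (by omega)
    simp only [List.length_append, List.length_cons, List.length_nil]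
    omega
  · right; rfl

theorem pv_phiL_step (c : Int) (ds : List Int) : ∀ (st : List Int × Array Nat),
    4 * ((List.foldl (pushL c) st ds).2.toList.count 0) + (List.foldl (pushL c) st ds).1.length ≤
      4 * (st.2.toList.count 0) + st.1.length := by
  induction ds with
  | nil => intro st; simp
  | cons d ds ih =>
    intro st
    have h1 := pv_phiL_push c st d
    have h2 := ih (pushL c st d)
    simp only [List.foldl_cons]
    rcases h1 with h1 | h1
    · omega
    · rw [h1] at h2 ⊢; omega

def loopL (e : Int) (q : List Int) (v : Array Nat) : Int :=
  match q with
  | [] => 0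
  | c :: q' =>
    if c = e then (vget v c : Int)
    else
      let st := stepL (q', v) c
      loopL e st.1 st.2
termination_by 4 * v.toList.count 0 + q.length
decreasing_by
  have h1 : 4 * ((stepL (q', v) c).2.toList.count 0) + (stepL (q', v) c).1.length ≤
      4 * (v.toList.count 0) + q'.length := pv_phiL_step c [-1, 1, 2] (q', v)
  simp only [List.length_cons]
  omega

def pushM (st : Array Nat × List Int) (n : Int) : Array Nat × List Int :=
  if vidx n < st.1.size ∧ 0 ≤ n ∧ n < 200000 ∧ vget st.1 n = 0 then
    (vset st.1 n 1, st.2 ++ [n])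
  else st

def stepM (st : Array Nat × List Int) (c : Int) : Array Nat × List Int :=
  List.foldl pushM st [c - 1, c + 1, c * 2]

theorem pv_phiM_push (st : Array Nat × List Int) (n : Int) :
    4 * ((pushM st n).1.toList.count 0) + (pushM st n).2.length + 3 ≤
      4 * (st.1.toList.count 0) + st.2.length ∨ pushM st n = st := by
  unfold pushM
  split_ifs with h
  · left
    have hc := pv_count_vset st.1 n 1 h.1 h.2.2.2 (by omega)
    simp only [List.length_append, List.length_cons, List.length_nil]
    omega
  · right; rfl

theorem pv_phiM_inner (ns : List Int) : ∀ (st : Array Nat × List Int),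
    4 * ((List.foldl pushM st ns).1.toList.count 0) + (List.foldl pushM st ns).2.length ≤
      4 * (st.1.toList.count 0) + st.2.length := by
  induction ns with
  | nil => intro st; simp
  | cons n ns ih =>
    intro st
    have h1 := pv_phiM_push st n
    have h2 := ih (pushM st n)
    simp only [List.foldl_cons]
    rcases h1 with h1 | h1
    · omega
    · rw [h1] at h2 ⊢; omega

theorem pv_phiM_outer (cs : List Int) : ∀ (st : Array Nat × List Int),
    4 * ((List.foldl stepM st cs).1.toList.count 0) + (List.foldl stepM st cs).2.length ≤
      4 * (st.1.toList.count 0) + st.2.length := by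
  induction cs with
  | nil => intro st; simp
  | cons c cs ih =>
    intro st
    have h1 : 4 * ((stepM st c).1.toList.count 0) + (stepM st c).2.length ≤
        4 * (st.1.toList.count 0) + st.2.length := pv_phiM_inner [c - 1, c + 1, c * 2] st
    have h2 := ih (stepM st c)
    rw [List.foldl_cons]
    omega

def loopM (e : Int) (fr : List Int) (v : Array Nat) (depth : Int) : Int :=
  match fr with
  | [] => 0
  | c :: fr' =>
    if e ∈ c :: fr' then depth
    else
      let st := List.foldl stepM (v, ([] : List Int)) (c :: fr')
      loopM e st.2 st.1 (depth + 1)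
termination_by 4 * v.toList.count 0 + fr.length
decreasing_by
  have h1 : 4 * ((List.foldl stepM (v, ([] : List Int)) (c :: fr')).1.toList.count 0) +
      (List.foldl stepM (v, ([] : List Int)) (c :: fr')).2.length ≤
      4 * (v.toList.count 0) + 0 := pv_phiM_outer (c :: fr') (v, ([] : List Int))
  simp only [List.length_cons]
  omega

-- basic facts about vidx / vget / vset

theorem vidx_lt (n : Int) (h0 : 0 ≤ n) (h2 : n < 200000) : vidx n < 200000 := by
  unfold vidx
  rw [if_neg (by omega)]
  omega

theorem vget_vset (v : Array Nat) (n x : Int) (w : Nat) :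
    vget (vset v n w) x = if vidx n < v.size ∧ vidx x = vidx n then w else vget v x := by
  unfold vget vset
  by_cases h1 : vidx n < v.size
  · by_cases h2 : vidx x = vidx n
    · simp [Array.getD, h2, h1]
    · by_cases h3 : vidx x < v.size
      · simp [Array.getD, h1, h2, h3, Ne.symm h2]
      · simp [Array.getD, h1, h2, h3]
  · rw [Array.setIfInBounds, dif_neg h1]
    simp [h1]

theorem vget_vset_pres (v : Array Nat) (n x : Int) (w : Nat) (h4 : vget v n = 0)
    (hx : vget v x ≠ 0) : vget (vset v n w) x = vget v x := by
  rw [vget_vset]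
  split_ifs with h
  · exfalso
    apply hx
    unfold vget
    rw [h.2]
    exact h4
  · rfl

theorem vget_vset_self (v : Array Nat) (n : Int) (w : Nat) (h1 : vidx n < v.size) :
    vget (vset v n w) n = w := by
  rw [vget_vset, if_pos ⟨h1, rfl⟩]

theorem size_vset (v : Array Nat) (n : Int) (w : Nat) : (vset v n w).size = v.size := by
  simp [vset]

-- queue-shape (shift) lemmas: pushes only append, so a queue prefix is inert

theorem pushL_shift (c d : Int) (pre q : List Int) (v : Array Nat) :
    pushL c (pre ++ q, v) d = (pre ++ (pushL c (q, v) d).1, (pushL c (q, v) d).2) := by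
  unfold pushL
  dsimp only
  split_ifs <;> simp

theorem foldl_pushL_shift (c : Int) (ds : List Int) : ∀ (pre q : List Int) (v : Array Nat),
    List.foldl (pushL c) (pre ++ q, v) ds =
      (pre ++ (List.foldl (pushL c) (q, v) ds).1, (List.foldl (pushL c) (q, v) ds).2) := by
  induction ds with
  | nil => simp
  | cons d ds ih =>
    intro pre q v
    simp only [List.foldl_cons]
    rw [pushL_shift]
    rw [ih pre (pushL c (q, v) d).1 (pushL c (q, v) d).2]

theorem stepL_shift (c : Int) (pre q : List Int) (v : Array Nat) :
    stepL (pre ++ q, v) c = (pre ++ (stepL (q, v) c).1, (stepL (q, v) c).2) := by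
  unfold stepL
  exact foldl_pushL_shift c [-1, 1, 2] pre q v

theorem foldl_stepL_shift (cs : List Int) : ∀ (pre q : List Int) (v : Array Nat),
    List.foldl stepL (pre ++ q, v) cs =
      (pre ++ (List.foldl stepL (q, v) cs).1, (List.foldl stepL (q, v) cs).2) := by
  induction cs with
  | nil => simp
  | cons c cs ih =>
    intro pre q v
    simp only [List.foldl_cons]
    rw [stepL_shift]
    rw [ih pre (stepL (q, v) c).1 (stepL (q, v) c).2]

-- preservation: pushes only write cells holding 0, so nonzero marks survive

theorem pushL_pres (c d : Int) (st : List Int × Array Nat) (x : Int)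
    (hx : vget st.2 x ≠ 0) : vget (pushL c st d).2 x = vget st.2 x := by
  unfold pushL
  dsimp only
  set n := if d.natAbs = 1 then c + d else c * d with hn
  split_ifs with h
  · exact vget_vset_pres st.2 n x _ h.2.2.2 hx
  · rfl

theorem stepL_pres (c : Int) (st : List Int × Array Nat) (x : Int)
    (hx : vget st.2 x ≠ 0) : vget (stepL st c).2 x = vget st.2 x := by
  unfold stepL
  simp only [List.foldl_cons, List.foldl_nil]
  have e1 := pushL_pres c (-1) st x hx
  have hx1 : vget (pushL c st (-1)).2 x ≠ 0 := by rw [e1]; exact hx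
  have e2 := pushL_pres c 1 (pushL c st (-1)) x hx1
  have hx2 : vget (pushL c (pushL c st (-1)) 1).2 x ≠ 0 := by rw [e2]; exact hx1
  have e3 := pushL_pres c 2 (pushL c (pushL c st (-1)) 1) x hx2
  rw [e3, e2, e1]

-- A's loop, processed one whole level at a time

theorem drain_found (e : Int) (dN : Nat) (hd : 1 ≤ dN) : ∀ (front rest : List Int) (vA : Array Nat),
    (∀ c ∈ front, vget vA c = dN) → e ∈ front → loopL e (front ++ rest) vA = (dN : Int) := by
  intro front
  induction front with
  | nil => intro rest vA _ he; simp at he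
  | cons c t ih =>
    intro rest vA hm he
    by_cases hc : c = e
    · simp only [List.cons_append, loopL, if_pos hc]
      rw [hm c (List.mem_cons_self)]
    · have he' : e ∈ t := by
        rcases List.mem_cons.mp he with h | h
        · exact absurd h.symm hc
        · exact h
      simp only [List.cons_append, loopL, if_neg hc]
      rw [stepL_shift c t rest vA]
      exact ih (stepL (rest, vA) c).1 (stepL (rest, vA) c).2
        (fun c' hc' => by
          rw [stepL_pres c (rest, vA) c'
            (by dsimp only; rw [hm c' (List.mem_cons_of_mem c hc')]; omega)]
          exact hm c' (List.mem_cons_of_mem c hc')) he'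

theorem drain_expand (e : Int) (dN : Nat) (hd : 1 ≤ dN) : ∀ (front rest : List Int) (vA : Array Nat),
    (∀ c ∈ front, vget vA c = dN) → e ∉ front →
      loopL e (front ++ rest) vA =
        loopL e (rest ++ (List.foldl stepL (([] : List Int), vA) front).1)
          (List.foldl stepL (([] : List Int), vA) front).2 := by
  intro front
  induction front with
  | nil => intro rest vA _ _; simp
  | cons c t ih =>
    intro rest vA hm he
    have hc : ¬ c = e := fun h => he (h ▸ List.mem_cons_self)
    have he' : e ∉ t := fun h => he (List.mem_cons_of_mem c h)
    simp only [List.cons_append, loopL, if_neg hc]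
    -- split off the new nodes produced by c
    have hS : stepL (rest, vA) c =
        (rest ++ (stepL (([] : List Int), vA) c).1, (stepL (([] : List Int), vA) c).2) := by
      conv_lhs => rw [show rest = rest ++ ([] : List Int) by simp]
      exact stepL_shift c rest [] vA
    rw [stepL_shift c t rest vA, hS]
    set S0 := stepL (([] : List Int), vA) c with hS0
    have hmt : ∀ c' ∈ t, vget S0.2 c' = dN := fun c' hc' => by
      rw [hS0, stepL_pres c (([] : List Int), vA) c'
        (by dsimp only; rw [hm c' (List.mem_cons_of_mem c hc')]; omega)]
      exact hm c' (List.mem_cons_of_mem c hc')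
    rw [ih (rest ++ S0.1) S0.2 hmt he']
    -- reassociate and fold the first step back in
    have hF : List.foldl stepL (([] : List Int), vA) (c :: t) =
        (S0.1 ++ (List.foldl stepL (([] : List Int), S0.2) t).1,
          (List.foldl stepL (([] : List Int), S0.2) t).2) := by
      simp only [List.foldl_cons]
      rw [show stepL (([] : List Int), vA) c = S0 from rfl]
      conv_lhs => rw [show S0 = (S0.1 ++ ([] : List Int), S0.2) by simp]
      exact foldl_stepL_shift t S0.1 [] S0.2
    rw [hF]
    simp [List.append_assoc]

-- the two expansions run in lockstep

def VRel (vA vB : Array Nat) : Prop :=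
  ∀ n : Int, 0 ≤ n → n < 200000 → (vget vA n = 0 ↔ vget vB n = 0)

theorem par_push (c nB d : Int) (dN : Nat) (vA vB : Array Nat) (acc : List Int)
    (hA : vA.size = 200000) (hB : vB.size = 200000) (hR : VRel vA vB)
    (hc : vget vA c = dN) (hacc : ∀ x ∈ acc, vget vA x = dN + 1)
    (hn : (if d.natAbs = 1 then c + d else c * d) = nB) :
    (pushL c (acc, vA) d).1 = (pushM (vB, acc) nB).2 ∧
    (pushL c (acc, vA) d).2.size = 200000 ∧ (pushM (vB, acc) nB).1.size = 200000 ∧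
    VRel (pushL c (acc, vA) d).2 (pushM (vB, acc) nB).1 ∧
    (∀ x, vget vA x ≠ 0 → vget (pushL c (acc, vA) d).2 x = vget vA x) ∧
    (∀ x ∈ (pushL c (acc, vA) d).1, vget (pushL c (acc, vA) d).2 x = dN + 1) := by
  subst hn
  unfold pushL pushM
  dsimp only
  set n := if d.natAbs = 1 then c + d else c * d with hdefn
  have hgiff : (vidx n < vA.size ∧ 0 ≤ n ∧ n < 200000 ∧ vget vA n = 0) ↔
      (vidx n < vB.size ∧ 0 ≤ n ∧ n < 200000 ∧ vget vB n = 0) := by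
    constructor
    · rintro ⟨h1, h2, h3, h4⟩
      exact ⟨by rw [hB]; exact vidx_lt n h2 h3, h2, h3, (hR n h2 h3).mp h4⟩
    · rintro ⟨h1, h2, h3, h4⟩
      exact ⟨by rw [hA]; exact vidx_lt n h2 h3, h2, h3, (hR n h2 h3).mpr h4⟩
  by_cases hg : vidx n < vA.size ∧ 0 ≤ n ∧ n < 200000 ∧ vget vA n = 0
  · rw [if_pos hg, if_pos (hgiff.mp hg)]
    obtain ⟨hg1, hg2, hg3, hg4⟩ := hg
    have hg1' : vidx n < vB.size := by rw [hB]; exact vidx_lt n hg2 hg3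
    refine ⟨rfl, by simp [size_vset, hA], by simp [size_vset, hB], ?_, ?_, ?_⟩
    · intro m hm0 hm2
      rw [vget_vset, vget_vset]
      by_cases hcond : vidx m = vidx n
      · rw [if_pos ⟨hg1, hcond⟩, if_pos ⟨hg1', hcond⟩]
        omega
      · rw [if_neg (by tauto), if_neg (by tauto)]
        exact hR m hm0 hm2
    · intro x hx
      exact vget_vset_pres vA n x _ hg4 hx
    · intro x hx
      rcases List.mem_append.mp hx with hx | hx
      · rw [vget_vset_pres vA n x _ hg4 (by rw [hacc x hx]; omega)]
        exact hacc x hx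
      · rw [List.mem_singleton.mp hx, vget_vset_self vA n _ hg1, hc]
  · rw [if_neg hg, if_neg (fun h => hg (hgiff.mpr h))]
    exact ⟨rfl, hA, hB, hR, fun x _ => rfl, hacc⟩

theorem par_step (c : Int) (dN : Nat) (vA vB : Array Nat) (acc : List Int)
    (hA : vA.size = 200000) (hB : vB.size = 200000) (hR : VRel vA vB)
    (hc : vget vA c = dN) (hd : 1 ≤ dN) (hacc : ∀ x ∈ acc, vget vA x = dN + 1) :
    (stepL (acc, vA) c).1 = (stepM (vB, acc) c).2 ∧
    (stepL (acc, vA) c).2.size = 200000 ∧ (stepM (vB, acc) c).1.size = 200000 ∧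
    VRel (stepL (acc, vA) c).2 (stepM (vB, acc) c).1 ∧
    (∀ x, vget vA x ≠ 0 → vget (stepL (acc, vA) c).2 x = vget vA x) ∧
    (∀ x ∈ (stepL (acc, vA) c).1, vget (stepL (acc, vA) c).2 x = dN + 1) := by
  simp only [stepL, stepM, List.foldl_cons, List.foldl_nil]
  obtain ⟨q1, sA1, sB1, R1, PA1, M1⟩ :=
    par_push c (c - 1) (-1) dN vA vB acc hA hB hR hc hacc (by norm_num; try omega)
  set L1 := pushL c (acc, vA) (-1) with hL1
  set B1 := pushM (vB, acc) (c - 1) with hB1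
  have hc1 : vget L1.2 c = dN := by rw [PA1 c (by omega)]; exact hc
  obtain ⟨q2, sA2, sB2, R2, PA2, M2⟩ :=
    par_push c (c + 1) 1 dN L1.2 B1.1 L1.1 sA1 sB1 R1 hc1 M1 (by norm_num; try omega)
  have eL1 : ((L1.1 : List Int), L1.2) = L1 := rfl
  have eB1 : ((B1.1 : Array Nat), L1.1) = B1 := by rw [q1]
  simp only [eL1, eB1] at q2 sA2 sB2 R2 PA2 M2
  set L2 := pushL c L1 1 with hL2
  set B2 := pushM B1 (c + 1) with hB2
  have hc2 : vget L2.2 c = dN := by rw [PA2 c (by omega)]; exact hc1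
  obtain ⟨q3, sA3, sB3, R3, PA3, M3⟩ :=
    par_push c (c * 2) 2 dN L2.2 B2.1 L2.1 sA2 sB2 R2 hc2 M2 (by norm_num; try omega)
  have eL2 : ((L2.1 : List Int), L2.2) = L2 := rfl
  have eB2 : ((B2.1 : Array Nat), L2.1) = B2 := by rw [q2]
  simp only [eL2, eB2] at q3 sA3 sB3 R3 PA3 M3
  refine ⟨q3, sA3, sB3, R3, ?_, M3⟩
  intro x hx
  have hx1 : vget L1.2 x ≠ 0 := by rw [PA1 x hx]; exact hx
  have hx2 : vget L2.2 x ≠ 0 := by rw [PA2 x hx1]; exact hx1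
  rw [PA3 x hx2, PA2 x hx1, PA1 x hx]

theorem par_fold (dN : Nat) (hd : 1 ≤ dN) : ∀ (fr : List Int) (vA vB : Array Nat) (acc : List Int),
    vA.size = 200000 → vB.size = 200000 → VRel vA vB →
    (∀ c ∈ fr, vget vA c = dN) → (∀ x ∈ acc, vget vA x = dN + 1) →
    (List.foldl stepL (acc, vA) fr).1 = (List.foldl stepM (vB, acc) fr).2 ∧
    (List.foldl stepL (acc, vA) fr).2.size = 200000 ∧
    (List.foldl stepM (vB, acc) fr).1.size = 200000 ∧
    VRel (List.foldl stepL (acc, vA) fr).2 (List.foldl stepM (vB, acc) fr).1 ∧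
    (∀ x ∈ (List.foldl stepL (acc, vA) fr).1, vget (List.foldl stepL (acc, vA) fr).2 x = dN + 1) := by
  intro fr
  induction fr with
  | nil =>
    intro vA vB acc hA hB hR _ hacc
    exact ⟨rfl, hA, hB, hR, hacc⟩
  | cons c t ih =>
    intro vA vB acc hA hB hR hm hacc
    obtain ⟨q1, sA1, sB1, R1, PA1, M1⟩ :=
      par_step c dN vA vB acc hA hB hR (hm c List.mem_cons_self) hd hacc
    simp only [List.foldl_cons]
    set SL := stepL (acc, vA) c with hSL
    set SM := stepM (vB, acc) c with hSM
    have hmt : ∀ c' ∈ t, vget SL.2 c' = dN := fun c' hc' => by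
      rw [PA1 c' (by rw [hm c' (List.mem_cons_of_mem c hc')]; omega)]
      exact hm c' (List.mem_cons_of_mem c hc')
    have := ih SL.2 SM.1 SL.1 sA1 sB1 R1 hmt M1
    have eL : ((SL.1 : List Int), SL.2) = SL := rfl
    have eM : ((SM.1 : Array Nat), SL.1) = SM := by rw [q1]
    simp only [eL, eM] at this
    exact this

-- the level-by-level equivalence

theorem level_eq (e : Int) : ∀ (μ : Nat) (fr : List Int) (vA vB : Array Nat) (dN : Nat) (depth : Int),
    4 * vB.toList.count 0 + fr.length ≤ μ →
    vA.size = 200000 → vB.size = 200000 → VRel vA vB →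
    (∀ c ∈ fr, vget vA c = dN) → 1 ≤ dN → depth = (dN : Int) →
    loopL e fr vA = loopM e fr vB depth := by
  intro μ
  induction μ using Nat.strong_induction_on with
  | _ μ ih =>
    intro fr vA vB dN depth hμ hA hB hR hm hd hdep
    cases fr with
    | nil => simp [loopL, loopM]
    | cons c t =>
      by_cases he : e ∈ c :: t
      · rw [show loopM e (c :: t) vB depth = depth by simp only [loopM, if_pos he]]
        have := drain_found e dN hd (c :: t) [] vA hm he
        rw [List.append_nil] at this
        rw [this, hdep]
      · rw [show loopM e (c :: t) vB depth =
            loopM e (List.foldl stepM (vB, ([] : List Int)) (c :: t)).2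
              (List.foldl stepM (vB, ([] : List Int)) (c :: t)).1 (depth + 1) by
          simp only [loopM, if_neg he]]
        have hdrain := drain_expand e dN hd (c :: t) [] vA hm he
        rw [List.append_nil] at hdrain
        rw [List.nil_append] at hdrain
        rw [hdrain]
        set F := List.foldl stepL (([] : List Int), vA) (c :: t) with hF
        set M := List.foldl stepM (vB, ([] : List Int)) (c :: t) with hM
        obtain ⟨q1, sA1, sB1, R1, M1⟩ :=
          par_fold dN hd (c :: t) vA vB [] hA hB hR hm (by simp)
        simp only [← hF, ← hM] at q1 sA1 sB1 R1 M1
        have hphi := pv_phiM_outer (c :: t) (vB, ([] : List Int))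
        simp only [← hM, List.length_nil] at hphi
        rw [q1]
        exact ih (4 * M.1.toList.count 0 + M.2.length)
          (by simp only [List.length_cons] at hμ; omega)
          M.2 F.2 M.1 (dN + 1) (depth + 1) le_rfl sA1 sB1 R1
          (fun x hx => M1 x (q1 ▸ hx)) (by omega) (by rw [hdep]; push_cast; ring)

-- bridges between the ports and their list-level models

theorem bra (c : Int) (ds : List Int) : ∀ (q : Array Int) (v : Array Nat),
    (List.foldl (pushA c) (q, v) ds).1.toList = (List.foldl (pushL c) (q.toList, v) ds).1 ∧
    (List.foldl (pushA c) (q, v) ds).2 = (List.foldl (pushL c) (q.toList, v) ds).2 := by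
  induction ds with
  | nil => intro q v; exact ⟨rfl, rfl⟩
  | cons d ds ih =>
    intro q v
    simp only [List.foldl_cons]
    have hp : (pushA c (q, v) d).1.toList = (pushL c (q.toList, v) d).1 ∧
        (pushA c (q, v) d).2 = (pushL c (q.toList, v) d).2 := by
      unfold pushA pushL
      dsimp only
      set n := if d.natAbs = 1 then c + d else c * d with hn
      split_ifs with h
      · exact ⟨by simp, rfl⟩
      · exact ⟨rfl, rfl⟩
    have hq : pushL c (q.toList, v) d = ((pushA c (q, v) d).1.toList, (pushA c (q, v) d).2) := by
      rw [hp.1, hp.2]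
    rw [hq]
    have := ih (pushA c (q, v) d).1 (pushA c (q, v) d).2
    simpa using this

theorem bridgeA (e : Int) : ∀ (q : Array Int) (head : Nat) (v : Array Nat),
    head ≤ q.size → bfsLoopA e q head v = loopL e (q.toList.drop head) v := by
  intro q head v hle
  induction q, head, v using bfsLoopA.induct e with
  | case1 q head v h c hc =>
    -- head in range, q[head] = e
    have hl : head < q.toList.length := by simpa using h
    rw [bfsLoopA]
    rw [dif_pos h, if_pos hc]
    rw [List.drop_eq_getElem_cons hl, loopL]
    rw [if_pos (by simpa using hc)]
    simp
  | case2 q head v h c hc st ih =>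
    have hc' : ¬ q[head] = e := hc
    have ih' : head + 1 ≤ (List.foldl (pushA q[head]) (q, v) [-1, 1, 2]).1.size →
        bfsLoopA e (List.foldl (pushA q[head]) (q, v) [-1, 1, 2]).1 (head + 1)
            (List.foldl (pushA q[head]) (q, v) [-1, 1, 2]).2 =
          loopL e (List.drop (head + 1) (List.foldl (pushA q[head]) (q, v) [-1, 1, 2]).1.toList)
            (List.foldl (pushA q[head]) (q, v) [-1, 1, 2]).2 := ih
    clear ih hc
    have hl : head < q.toList.length := by simpa using h
    have hsz : head + 1 ≤ (List.foldl (pushA q[head]) (q, v) [-1, 1, 2]).1.size := by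
      have h2 := pv_sizeA_fold q[head] [-1, 1, 2] (q, v)
      dsimp only at h2
      omega
    rw [bfsLoopA]
    rw [dif_pos h, if_neg hc']
    rw [List.drop_eq_getElem_cons hl, loopL]
    rw [if_neg (by simpa using hc')]
    rw [ih' hsz]
    -- identify the two states
    have hbra := bra q[head] [-1, 1, 2] q v
    have hsplit : q.toList = q.toList.take (head + 1) ++ q.toList.drop (head + 1) :=
      (List.take_append_drop (head + 1) q.toList).symm
    have hshift := foldl_pushL_shift q[head] [-1, 1, 2]
      (q.toList.take (head + 1)) (q.toList.drop (head + 1)) v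
    have htk : (q.toList.take (head + 1)).length = head + 1 := by
      rw [List.length_take]
      omega
    -- the inner (suffix) fold
    set I := List.foldl (pushL q[head]) (q.toList.drop (head + 1), v) [-1, 1, 2] with hI
    have hfold : List.foldl (pushL q[head]) (q.toList, v) [-1, 1, 2] =
        (q.toList.take (head + 1) ++ I.1, I.2) := by
      conv_lhs => rw [hsplit]
      exact hshift
    have h1 : st.1.toList.drop (head + 1) = I.1 := by
      rw [hbra.1, hfold]
      dsimp only
      exact List.drop_left' htk
    have h2 : st.2 = I.2 := by rw [hbra.2, hfold]
    rw [h1, h2]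
    have hgl : q.toList[head] = q[head] := by simp
    rw [hgl]
    rfl
  | case3 q head v h =>
    rw [bfsLoopA]
    rw [dif_neg h]
    rw [List.drop_eq_nil_of_le (by simp; omega : q.toList.length ≤ head)]
    rw [loopL]

theorem brb_push (v : Array Nat) (accB : Array Int) (accM : List Int)
    (hacc : accB.toList = accM) (n : Int) :
    (pushB (v, accB) n).1 = (pushM (v, accM) n).1 ∧
    (pushB (v, accB) n).2.toList = (pushM (v, accM) n).2 := by
  unfold pushB pushM
  dsimp only
  split_ifs with h
  · exact ⟨rfl, by simp [hacc]⟩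
  · exact ⟨rfl, hacc⟩

theorem brb_fold (ns : List Int) : ∀ (v : Array Nat) (accB : Array Int) (accM : List Int),
    accB.toList = accM →
    (List.foldl pushB (v, accB) ns).1 = (List.foldl pushM (v, accM) ns).1 ∧
    (List.foldl pushB (v, accB) ns).2.toList = (List.foldl pushM (v, accM) ns).2 := by
  induction ns with
  | nil => intro v accB accM hacc; exact ⟨rfl, hacc⟩
  | cons n ns ih =>
    intro v accB accM hacc
    simp only [List.foldl_cons]
    obtain ⟨p1, p2⟩ := brb_push v accB accM hacc n
    have hq : pushM (v, accM) n = ((pushB (v, accB) n).1, (pushM (v, accM) n).2) := by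
      rw [p1]
    rw [hq]
    have := ih (pushB (v, accB) n).1 (pushB (v, accB) n).2 (pushM (v, accM) n).2 p2
    simpa using this

theorem brb_outer (cs : List Int) : ∀ (v : Array Nat) (accB : Array Int) (accM : List Int),
    accB.toList = accM →
    (List.foldl stepB (v, accB) cs).1 = (List.foldl stepM (v, accM) cs).1 ∧
    (List.foldl stepB (v, accB) cs).2.toList = (List.foldl stepM (v, accM) cs).2 := by
  induction cs with
  | nil => intro v accB accM hacc; exact ⟨rfl, hacc⟩
  | cons c cs ih =>
    intro v accB accM hacc
    simp only [List.foldl_cons]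
    obtain ⟨p1, p2⟩ := brb_fold [c - 1, c + 1, c * 2] v accB accM hacc
    have hp1 : (stepB (v, accB) c).1 = (stepM (v, accM) c).1 := p1
    have hp2 : (stepB (v, accB) c).2.toList = (stepM (v, accM) c).2 := p2
    have hq : stepM (v, accM) c = ((stepB (v, accB) c).1, (stepM (v, accM) c).2) := by
      rw [hp1]
    rw [hq]
    have := ih (stepB (v, accB) c).1 (stepB (v, accB) c).2 (stepM (v, accM) c).2 hp2
    simpa using this

theorem bridgeB (e : Int) : ∀ (fr : Array Int) (v : Array Nat) (depth : Int),
    bfsLoopB e fr v depth = loopM e fr.toList v depth := by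
  intro fr v depth
  induction fr, v, depth using bfsLoopB.induct e with
  | case1 fr v depth h =>
    rw [bfsLoopB, if_pos h]
    rw [show fr.toList = [] by rw [← List.length_eq_zero_iff]; simpa using h]
    rw [loopM]
  | case2 fr v depth h1 h2 =>
    rw [bfsLoopB, if_neg h1, if_pos h2]
    have hmem : e ∈ fr.toList := by simpa using h2
    rcases htl : fr.toList with _ | ⟨c, rest⟩
    · rw [htl] at hmem; simp at hmem
    · rw [htl] at hmem
      rw [loopM, if_pos hmem]
  | case3 fr v depth h1 h2 st ih =>
    have hmem : e ∉ fr.toList := by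
      intro hm
      exact h2 (by simpa using hm)
    have hst : st = List.foldl stepB (v, #[]) fr.toList := by
      show Array.foldl _ (v, #[]) fr.attach = _
      simp only [Array.size_attach, Array.foldl_subtype', Array.unattach_attach]
      rw [← Array.foldl_toList]
    have ih' : bfsLoopB e (List.foldl stepB (v, #[]) fr.toList).2
          (List.foldl stepB (v, #[]) fr.toList).1 (depth + 1) =
        loopM e (List.foldl stepB (v, #[]) fr.toList).2.toList
          (List.foldl stepB (v, #[]) fr.toList).1 (depth + 1) := by
      rw [← hst]; exact ih
    rw [bfsLoopB, if_neg h1, if_neg h2]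
    show bfsLoopB e (fr.foldl stepB (v, #[])).2 (fr.foldl stepB (v, #[])).1 (depth + 1) = _
    rw [← Array.foldl_toList]
    rw [ih']
    obtain ⟨p1, p2⟩ := brb_outer fr.toList v #[] [] rfl
    rcases htl : fr.toList with _ | ⟨c, rest⟩
    · exfalso; apply h1; rw [← Array.length_toList, htl]; rfl
    · rw [htl] at hmem
      rw [loopM, if_neg hmem]
      rw [htl] at p1 p2
      rw [p1, p2]

-- ===== VERDICT (by name: the statement is the Claim_ definition above) =====
theorem bfs_spec : Claim_equal_bfs := by
  intro s e _ hpre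
  unfold Spec_bfs bfs bfs_alt
  have hs : vidx s < 200000 := by
    unfold vidx
    rcases hpre.1 with ⟨h1, h2⟩
    split_ifs <;> omega
  set v1 := vset (Array.replicate 200000 0) s 1 with hv1
  have hsz : v1.size = 200000 := by
    rw [hv1, size_vset]; simp
  have hmark : vget v1 s = 1 := by
    rw [hv1, vget_vset_self]
    simpa using hs
  rw [bridgeA e #[s] 0 v1 (by simp)]
  rw [bridgeB e #[s] v1 1]
  have htl : (#[s] : Array Int).toList = [s] := rfl
  rw [htl]
  simp only [List.drop_zero]
  exact level_eq e (4 * v1.toList.count 0 + 1) [s] v1 v1 1 1 (by simp)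
    hsz hsz (fun n _ _ => Iff.rfl)
    (by intro c hc; simp at hc; rw [hc]; exact hmark) le_rfl (by simp)
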